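-- pv_equiv track=rewrite | github.com/paladyn55/D2KDbot | snake_draft.py | snake_draft
-- ===== SOURCE A (Python) =====
-- def invert_array(array):
--   inverted = []
--   for i in range(len(array)):
--     inverted.append(array.pop())
--   return inverted
--
-- def snake_draft(ordered_players, people_per_team):
--     number_teams = len(ordered_players)//people_per_team
--     teams = []
--     for _ in range(number_teams):
--         teams.append([])
--
--     while len(ordered_players) > 0:
--         for team in teams:
--             team.append(ordered_players.pop(0))
--         teams = invert_array(teams)
--
--     return teams
-- ===== SOURCE B (Python) =====
-- def snake_draft(ordered_players, people_per_team):
--     t = len(ordered_players) // people_per_team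
--     teams = [[ordered_players[r * t + (j if r % 2 == 0 else t - 1 - j)]
--               for r in range(people_per_team)]
--              for j in range(t)]
--     return teams if people_per_team % 2 == 0 else teams[::-1]
-- ===== Notes on version B (the rewrite author's own statement) =====
-- stated objective: alternative
-- what changed: Replaces the round-by-round draft simulation (repeated pop(0) from the player list and a full reversal of the teams list after every round) with direct index arithmetic: team j is built in one comprehension from players r*t + (j or t-1-j) by round parity, with one final reversal if the number of rounds is odd (O(n) work instead of A's quadratic pop(0)/reversal loop, though a timing run's large inputs fall outside Pre_, so no speed is claimed).
-- outside the precondition, e.g. on snake_draft([107, 4, -3, -1, 4], 3): A returns [[107, 4, -3, -1, 4]], B returns [[107, 4, -3]]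
import Mathlib
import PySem

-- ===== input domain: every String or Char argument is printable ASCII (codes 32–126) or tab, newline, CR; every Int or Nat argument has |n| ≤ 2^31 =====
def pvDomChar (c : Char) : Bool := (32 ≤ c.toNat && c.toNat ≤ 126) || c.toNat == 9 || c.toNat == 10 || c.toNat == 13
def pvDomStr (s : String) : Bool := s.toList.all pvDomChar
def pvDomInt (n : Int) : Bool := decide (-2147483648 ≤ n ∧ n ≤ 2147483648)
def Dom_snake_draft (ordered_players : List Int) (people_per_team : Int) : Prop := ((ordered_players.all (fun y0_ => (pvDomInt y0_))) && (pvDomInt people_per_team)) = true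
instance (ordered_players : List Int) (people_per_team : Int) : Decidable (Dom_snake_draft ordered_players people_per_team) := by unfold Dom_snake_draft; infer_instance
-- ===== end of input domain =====

-- B replaces A's round-by-round simulation (pop(0) + reversing the teams list every round) by direct
-- index arithmetic over the player list; equivalence is about the RETURN value only: A empties its
-- ordered_players argument in place, B does not mutate it.

-- ===== PORT A =====
-- one step of "for team in teams: team.append(ordered_players.pop(0))";  pop(0) on an empty
-- list raises IndexError in Python (excluded by Pre_), here the state is left unchanged but the team kept
def pvRoundStep (st : List Int × List (List Int)) (team : List Int) : List Int × List (List Int) :=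
  match st.1 with
  | [] => (st.1, st.2 ++ [team])
  | p :: rest => (rest, st.2 ++ [team ++ [p]])

def pvRound (P : List Int) (T : List (List Int)) : List Int × List (List Int) :=
  T.foldl pvRoundStep (P, [])

-- def invert_array(array): for i in range(len(array)): inverted.append(array.pop())
def invert_array (array : List (List Int)) : List (List Int) :=
  ((List.range array.length).foldl
    (fun (st : List (List Int) × List (List Int)) _ =>
      match PySem.List.pop? st.1 (-1) with
      | some (x, rest) => (rest, st.2 ++ [x])
      | none => st) (array, [])).2

-- termination measure for the while loop (cited by snakeLoop's decreasing_by)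
theorem pvRound_fst_length (T : List (List Int)) : ∀ (P : List Int) (acc : List (List Int)),
    (T.foldl pvRoundStep (P, acc)).1.length = P.length - T.length := by
  induction T with
  | nil => intro P acc; simp
  | cons team T ih =>
      intro P acc
      cases P with
      | nil => simp [pvRoundStep, ih]
      | cons p rest => simp [pvRoundStep, ih]

-- while len(ordered_players) > 0: … ;  'T ≠ []' is a totality guard only: with no teams the
-- Python loop never terminates (such inputs are excluded by Pre_)
def snakeLoop (P : List Int) (T : List (List Int)) : List (List Int) :=
  if _h : 0 < P.length ∧ T ≠ [] then
    snakeLoop (pvRound P T).1 (invert_array (pvRound P T).2)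
  else T
termination_by P.length
decreasing_by
  have hl := pvRound_fst_length T P []
  have ht : 0 < T.length := List.length_pos_iff.mpr _h.2
  simp only [pvRound]
  omega

def snake_draft (ordered_players : List Int) (people_per_team : Int) : List (List Int) :=
  let number_teams := PySem.Int.floordiv (ordered_players.length : Int) people_per_team
  let teams := (PySem.List.pyRange 0 number_teams 1).foldl
      (fun (acc : List (List Int)) _ => acc ++ [[]]) []
  snakeLoop ordered_players teams

-- ===== PORT B =====
-- pyGet? is exact Python indexing; inside Pre_ every index is in range, the .getD 0 is never used;
-- teams[::-1] is reversal
def snake_draft_alt (ordered_players : List Int) (people_per_team : Int) : List (List Int) :=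
  let t := PySem.Int.floordiv (ordered_players.length : Int) people_per_team
  let teams := (PySem.List.pyRange 0 t 1).map (fun j =>
    (PySem.List.pyRange 0 people_per_team 1).map (fun r =>
      (PySem.List.pyGet? ordered_players
        (r * t + (if PySem.Int.mod r 2 == 0 then j else t - 1 - j))).getD 0))
  if PySem.Int.mod people_per_team 2 == 0 then teams else teams.reverse

-- ===== PRECONDITION & SPEC =====
-- Pre_ excludes people_per_team = 0 (A raises ZeroDivisionError) and nonempty lists whose length
-- is not a multiple of people_per_team: there the draft is ill-specified (the teams cannot all get
-- people_per_team players) and A raises IndexError, loops forever, or — when len is a multiple of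
-- len // people_per_team — returns teams of a size other than people_per_team, while B fills each
-- of the len // people_per_team teams with exactly people_per_team players; neither corner value is
-- the specified one. Also excluded: people_per_team < 0 with a nonempty list (A loops forever).
def Pre_snake_draft (ordered_players : List Int) (people_per_team : Int) : Prop :=
  people_per_team ≠ 0 ∧
    (ordered_players = [] ∨
      (0 < people_per_team ∧ PySem.Int.mod (ordered_players.length : Int) people_per_team = 0))

instance (ordered_players : List Int) (people_per_team : Int) : Decidable (Pre_snake_draft ordered_players people_per_team) := by
  unfold Pre_snake_draft; infer_instance

def pvWitness_snake_draft : List Int × Int := ([1, 2, 3, 4, 5, 6], 2)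

def Spec_snake_draft (ordered_players : List Int) (people_per_team : Int) (out : List (List Int)) : Prop := out = snake_draft_alt ordered_players people_per_team
instance (ordered_players : List Int) (people_per_team : Int) (out : List (List Int)) : Decidable (Spec_snake_draft ordered_players people_per_team out) := by unfold Spec_snake_draft; infer_instance

-- ===== CLAIM (what is proved, stated in full; the proofs are below) =====
def Claim_equal_snake_draft : Prop := ∀ (ordered_players : List Int) (people_per_team : Int), Dom_snake_draft ordered_players people_per_team → Pre_snake_draft ordered_players people_per_team → Spec_snake_draft ordered_players people_per_team (snake_draft ordered_players people_per_team)

-- ===== LEMMAS AND PROOFS =====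

-- closed-form description of the snake draft, used to connect the two ports
def pvSig (t r j : Nat) : Nat := if r % 2 = 0 then j else t - 1 - j

def pvColAt (k t : Nat) (P : List Int) (j : Nat) : List Int :=
  (List.range k).map (fun r => P.getD (r * t + pvSig t r j) 0)

def pvCols (k t : Nat) (P : List Int) : List (List Int) :=
  (List.range t).map (pvColAt k t P)

def pvOrient (k : Nat) (X : List (List Int)) : List (List Int) :=
  if k % 2 = 0 then X else X.reverse

theorem pvInvert_go : ∀ (n : Nat) (A acc : List (List Int)), A.length = n →
    (List.range n).foldl
      (fun (st : List (List Int) × List (List Int)) _ =>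
        match PySem.List.pop? st.1 (-1) with
        | some (x, rest) => (rest, st.2 ++ [x])
        | none => st) (A, acc) = ([], acc ++ A.reverse) := by
  intro n
  induction n with
  | zero => intro A acc h; simp [List.length_eq_zero_iff.mp h]
  | succ n ih =>
      intro A acc h
      rcases (List.eq_nil_or_concat A) with rfl | ⟨B, x, rfl⟩
      · simp at h
      · simp only [List.concat_eq_append] at h ⊢
        rw [List.range_succ_eq_map, List.foldl_cons, List.foldl_map]
        have hB : B.length = n := by simpa using h
        simp only [PySem.List.pop?_last]
        rw [ih B (acc ++ [x]) hB]
        simp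

theorem invert_array_eq (A : List (List Int)) : invert_array A = A.reverse := by
  unfold invert_array
  rw [pvInvert_go A.length A [] rfl]
  simp

theorem pvRound_eq (T : List (List Int)) : ∀ (P : List Int) (acc : List (List Int)),
    T.length ≤ P.length →
    T.foldl pvRoundStep (P, acc) =
      (P.drop T.length, acc ++ T.zipWith (fun tm p => tm ++ [p]) (P.take T.length)) := by
  induction T with
  | nil => intro P acc _; simp
  | cons team T ih =>
      intro P acc hle
      cases P with
      | nil => simp at hle
      | cons p rest =>
          simp only [List.foldl_cons, pvRoundStep]
          rw [ih rest (acc ++ [team ++ [p]]) (by simpa using hle)]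
          simp

theorem pvColAt_succ (k t : Nat) (P : List Int) (j : Nat) (hj : j < t) :
    pvColAt (k + 1) t P j = P.getD j 0 :: pvColAt k t (P.drop t) (t - 1 - j) := by
  unfold pvColAt
  rw [List.range_succ_eq_map, List.map_cons, List.map_map]
  congr 1
  · simp [pvSig]
  · apply List.map_congr_left
    intro r _
    simp only [Function.comp]
    have hdrop : ∀ (i : Nat), (P.drop t).getD i 0 = P.getD (t + i) 0 := by
      intro i; simp [List.getD, List.getElem?_drop]
    rw [hdrop]
    congr 1
    unfold pvSig
    rw [Nat.succ_mul]
    split <;> split <;> omega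

theorem pvOrient_succ (k : Nat) (X : List (List Int)) :
    pvOrient (k + 1) X = pvOrient k X.reverse := by
  rcases Nat.mod_two_eq_zero_or_one k with h | h
  · have h2 : (k + 1) % 2 = 1 := by omega
    simp [pvOrient, h, h2]
  · have h2 : (k + 1) % 2 = 0 := by omega
    simp [pvOrient, h, h2]

theorem pvZip_nil (T : List (List Int)) (t : Nat) (P : List Int) (hT : T.length = t) :
    T.zipWith (fun a b => a ++ b) (pvCols 0 t P) = T := by
  subst hT
  apply List.ext_getElem
  · simp [pvCols]
  · intro i h1 h2
    simp [List.getElem_zipWith, pvCols, pvColAt]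

theorem pvZip_step (T : List (List Int)) (C : List Int) (k t : Nat) (P : List Int)
    (hT : T.length = t) (hC : C.length = t) (hP : t ≤ P.length) (hCP : C = P.take t) :
    (T.zipWith (fun tm p => tm ++ [p]) C).reverse.zipWith (fun a b => a ++ b)
        (pvCols k t (P.drop t)) =
      (T.zipWith (fun a b => a ++ b) (pvCols (k + 1) t P)).reverse := by
  apply List.ext_getElem
  · simp [pvCols, hT, hC]
  · intro i h1 h2
    have hi : i < t := by simp [pvCols, hT, hC] at h1; omega
    have hji : t - 1 - i < t := by omega
    simp only [List.getElem_zipWith, List.getElem_reverse, List.length_zipWith,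
      pvCols, List.getElem_map, List.getElem_range, hT, hC,
      List.length_map, List.length_range, Nat.min_self]
    rw [pvColAt_succ k t P (t - 1 - i) hji]
    have hii : t - 1 - (t - 1 - i) = i := by omega
    rw [hii]
    have hgC : C[t - 1 - i]'(by omega) = P.getD (t - 1 - i) 0 := by
      subst hCP
      rw [List.getElem_take]
      rw [List.getD_eq_getElem _ _ (by omega)]
    rw [hgC]
    simp

theorem snakeLoop_eq (k : Nat) : ∀ (t : Nat), 0 < t → ∀ (P : List Int) (T : List (List Int)),
    P.length = k * t → T.length = t →
    snakeLoop P T = pvOrient k (T.zipWith (fun a b => a ++ b) (pvCols k t P)) := by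
  induction k with
  | zero =>
      intro t ht P T hP hT
      have hPnil : P = [] := by simpa using hP
      subst hPnil
      rw [snakeLoop]
      simp only [List.length_nil, lt_irrefl, false_and, dite_false, pvOrient,
        Nat.zero_mod]
      exact (pvZip_nil T t [] hT).symm
  | succ k ih =>
      intro t ht P T hP hT
      have hTne : T ≠ [] := by
        intro h; rw [h] at hT; simp at hT; omega
      have hlen : 0 < P.length := by
        rw [hP]; exact Nat.mul_pos (Nat.succ_pos k) ht
      have hle : T.length ≤ P.length := by
        rw [hT, hP]
        calc t = 1 * t := (Nat.one_mul t).symm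
        _ ≤ (k + 1) * t := Nat.mul_le_mul_right t (by omega)
      rw [snakeLoop, dif_pos ⟨hlen, hTne⟩]
      have hr := pvRound_eq T P [] hle
      simp only [pvRound, hr, List.nil_append, hT]
      rw [invert_array_eq]
      have hdlen : (P.drop t).length = k * t := by
        simp [hP, Nat.succ_mul]
      have hzlen : ((T.zipWith (fun tm p => tm ++ [p]) (P.take t)).reverse).length = t := by
        simp [hT, List.length_take]
        omega
      rw [ih t ht (P.drop t) _ hdlen hzlen]
      rw [pvOrient_succ]
      congr 1
      exact pvZip_step T (P.take t) k t P hT (by simp [List.length_take]; omega)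
        (by rw [← hT]; exact hle) rfl

theorem pvB_cols (P : List Int) (t : Int) (ht0 : 0 ≤ t) (ppt : Int)  :
    List.map (fun j =>
      List.map (fun r => (PySem.List.pyGet? P
          (r * t + if (PySem.Int.mod r 2 == 0) = true then j else t - 1 - j)).getD 0)
        (PySem.List.pyRange 0 ppt)) (PySem.List.pyRange 0 t)
    = pvCols ppt.toNat t.toNat P := by
  lift t to ℕ using ht0 with tn
  simp only [Int.toNat_natCast]
  rw [PySem.List.pyRange_one 0 tn, PySem.List.pyRange_one 0 ppt]
  simp only [sub_zero, zero_add, List.map_map, Int.toNat_natCast]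
  unfold pvCols
  apply List.map_congr_left
  intro j hj
  have hjlt : j < tn := List.mem_range.mp hj
  simp only [Function.comp]
  unfold pvColAt
  apply List.map_congr_left
  intro r hr
  simp only [Function.comp_apply]
  have hmod : PySem.Int.mod (r : Int) 2 = ((r % 2 : Nat) : Int) := by
    exact_mod_cast PySem.Int.mod_natCast r 2
  rcases Nat.mod_two_eq_zero_or_one r with h | h
  · have hb : (PySem.Int.mod (r : Int) 2 == 0) = true := by rw [hmod, h]; rfl
    rw [hb, if_pos rfl]
    have hidx : ((r : Int) * (tn : Int) + (j : Int)) = ((r * tn + pvSig tn r j : Nat) : Int) := by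
      unfold pvSig; rw [if_pos h]; push_cast; ring
    rw [hidx, PySem.List.pyGet?_natCast]
    rfl
  · have hb : (PySem.Int.mod (r : Int) 2 == 0) = false := by rw [hmod, h]; rfl
    rw [hb]
    simp only [Bool.false_eq_true, if_false]
    have hidx : ((r : Int) * (tn : Int) + ((tn : Int) - 1 - (j : Int))) = ((r * tn + pvSig tn r j : Nat) : Int) := by
      unfold pvSig; rw [if_neg (by omega)]
      have hsub : ((tn - 1 - j : Nat) : Int) = (tn : Int) - 1 - (j : Int) := by omega
      push_cast [hsub]
      ring
    rw [hidx, PySem.List.pyGet?_natCast]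
    rfl

theorem pvAlt_eq (P : List Int) (ppt : Int) (hp : 0 < ppt) :
    snake_draft_alt P ppt =
      pvOrient ppt.toNat (pvCols ppt.toNat (PySem.Int.floordiv (P.length : Int) ppt).toNat P) := by
  have ht0 : 0 ≤ PySem.Int.floordiv (P.length : Int) ppt := by
    rw [PySem.Int.floordiv_eq_ediv_of_pos hp]
    exact Int.ediv_nonneg (by positivity) hp.le
  have hkc : ((ppt.toNat : Nat) : Int) = ppt := Int.toNat_of_nonneg hp.le
  unfold snake_draft_alt
  dsimp only
  rw [pvB_cols P _ ht0]
  have hmodp : PySem.Int.mod ppt 2 = ((ppt.toNat % 2 : Nat) : Int) := by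
    rw [← hkc]; exact_mod_cast PySem.Int.mod_natCast ppt.toNat 2
  unfold pvOrient
  rcases Nat.mod_two_eq_zero_or_one ppt.toNat with h | h
  · have hb : (PySem.Int.mod ppt 2 == 0) = true := by rw [hmodp, h]; rfl
    rw [hb, if_pos rfl, if_pos h]
  · have hb : (PySem.Int.mod ppt 2 == 0) = false := by rw [hmodp, h]; rfl
    have h0 : ¬ (ppt.toNat % 2 = 0) := by omega
    simp only [hb, Bool.false_eq_true, if_false, if_neg h0]

theorem pvInit (l : List Int) : ∀ (acc : List (List Int)),
    l.foldl (fun (acc : List (List Int)) _ => acc ++ [[]]) acc = acc ++ List.replicate l.length [] := by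
  induction l with
  | nil => intro acc; simp
  | cons x l ih =>
      intro acc
      simp only [List.foldl_cons, ih, List.length_cons]
      simp [List.replicate_succ]


theorem pvZip_repl (t : Nat) (X : List (List Int)) (hX : X.length = t) :
    List.zipWith (fun a b => a ++ b) (List.replicate t ([] : List Int)) X = X := by
  apply List.ext_getElem
  · simp [hX]
  · intro i h1 h2
    simp [List.getElem_zipWith]

-- ===== VERDICT (by name: the statement is the Claim_ definition above) =====
theorem snake_draft_spec : Claim_equal_snake_draft := by
  intro P ppt _hdom hpre
  obtain ⟨hne, hcase⟩ := hpre
  unfold Spec_snake_draft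
  by_cases hPnil : P = []
  · -- empty player list: both ports return []
    subst hPnil
    unfold snake_draft snake_draft_alt
    dsimp only
    have h0 : PySem.Int.floordiv ((List.length ([] : List Int) : Int)) ppt = 0 := by
      simp [PySem.Int.floordiv]
    rw [h0]
    rw [PySem.List.pyRange_one_eq_nil le_rfl]
    simp only [List.foldl_nil, List.map_nil]
    rw [snakeLoop]
    simp
  · -- nonempty case
    obtain ⟨hp, hd⟩ := hcase.resolve_left hPnil
    have hdvd : ppt ∣ (P.length : Int) := (PySem.Int.mod_eq_zero_iff_dvd _ _).mp hd
    have ht0 : 0 ≤ PySem.Int.floordiv (P.length : Int) ppt := by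
      rw [PySem.Int.floordiv_eq_ediv_of_pos hp]
      exact Int.ediv_nonneg (by positivity) hp.le
    have hmul : ppt * PySem.Int.floordiv (P.length : Int) ppt = (P.length : Int) := by
      rw [PySem.Int.floordiv_eq_ediv_of_pos hp]
      exact Int.mul_ediv_cancel' hdvd
    have hPlen : P.length = ppt.toNat * (PySem.Int.floordiv (P.length : Int) ppt).toNat := by
      have : ((ppt.toNat * (PySem.Int.floordiv (P.length : Int) ppt).toNat : Nat) : Int)
          = (P.length : Int) := by
        push_cast [Int.toNat_of_nonneg hp.le, Int.toNat_of_nonneg ht0]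
        exact hmul
      exact_mod_cast this.symm
    have hPpos : 0 < P.length := List.length_pos_iff.mpr hPnil
    have htpos : 0 < (PySem.Int.floordiv (P.length : Int) ppt).toNat := by
      rcases Nat.eq_zero_or_pos (PySem.Int.floordiv (P.length : Int) ppt).toNat with h | h
      · rw [h, Nat.mul_zero] at hPlen; omega
      · exact h
    -- A side
    unfold snake_draft
    dsimp only
    rw [pvInit]
    simp only [List.nil_append, PySem.List.length_pyRange_one, sub_zero]
    rw [snakeLoop_eq ppt.toNat (PySem.Int.floordiv (P.length : Int) ppt).toNat htpos P _
      hPlen (by simp)]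
    rw [pvZip_repl _ _ (by simp [pvCols])]
    exact (pvAlt_eq P ppt hp).symm
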